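-- pv_equiv track=rewrite | github.com/settadev/setta | backend/setta/code_gen/python/position_line_col.py | position_to_line_col
-- ===== SOURCE A (Python) =====
-- def position_to_line_col(text, position):
--     if position < 0 or position > len(text):
--         return None
--
--     lines = text.split("\n")
--     current_pos = 0
--
--     for line_num, line in enumerate(lines):
--         line_length = len(line) + 1  # +1 for the newline character
--         if current_pos + line_length > position:
--             col = position - current_pos
--             return line_num, col
--         current_pos += line_length
--
--     # If we get here, the position is at the very end of the text
--     return len(lines) - 1, len(lines[-1])
-- ===== SOURCE B (Python) =====
-- def position_to_line_col(text, position):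
--     if position < 0 or position > len(text):
--         return None
--     line = col = 0
--     for ch in text[:position]:
--         if ch == "\n":
--             line += 1
--             col = 0
--         else:
--             col += 1
--     return line, col
-- ===== Notes on version B (the rewrite author's own statement) =====
-- stated objective: simpler
-- what changed: B drops the split-into-lines list and the enumerate loop with early return, instead folding a (line, col) accumulator over the characters of text[:position] (newline increments line and resets col).
import Mathlib
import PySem

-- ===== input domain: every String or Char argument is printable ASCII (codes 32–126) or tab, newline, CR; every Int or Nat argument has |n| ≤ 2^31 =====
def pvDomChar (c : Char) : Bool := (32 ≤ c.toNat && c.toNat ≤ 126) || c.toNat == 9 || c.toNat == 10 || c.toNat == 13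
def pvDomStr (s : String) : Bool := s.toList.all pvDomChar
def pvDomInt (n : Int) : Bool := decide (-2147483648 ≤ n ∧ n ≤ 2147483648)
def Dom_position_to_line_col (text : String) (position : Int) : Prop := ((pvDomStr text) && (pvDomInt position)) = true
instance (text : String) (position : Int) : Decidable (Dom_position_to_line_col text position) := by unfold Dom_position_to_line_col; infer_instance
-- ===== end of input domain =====

-- B replaces A's split-into-lines loop by a single (line, col) fold over the chars of text[:position] (objective: simpler).

-- ===== PORT A =====
-- the for-loop over enumerate(lines) with its early return
def pvALoop (position : Int) : List (Int × List Char) → Int → Option (Int × Int)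
  | [], _ => none
  | (lineNum, line) :: rest, currentPos =>
      let lineLength : Int := (line.length : Int) + 1
      if currentPos + lineLength > position then some (lineNum, position - currentPos)
      else pvALoop position rest (currentPos + lineLength)

def position_to_line_col (text : String) (position : Int) : Option (Int × Int) :=
  if position < 0 ∨ position > PySem.Str.len text then none
  else
    let lines := PySem.Chars.splitOn text.toList ['\n']
    match pvALoop position (PySem.List.enumerate lines 0) 0 with
    | some r => some r
    | none => some ((lines.length : Int) - 1, (((PySem.List.pyGet? lines (-1)).getD []).length : Int))

-- ===== PORT B =====
def pvBStep (acc : Int × Int) (ch : Char) : Int × Int :=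
  if ch = '\n' then (acc.1 + 1, 0) else (acc.1, acc.2 + 1)

def position_to_line_col_alt (text : String) (position : Int) : Option (Int × Int) :=
  if position < 0 ∨ position > PySem.Str.len text then none
  else some ((PySem.Chars.slice text.toList none (some position)).foldl pvBStep (0, 0))

-- ===== PRECONDITION & SPEC =====
def Spec_position_to_line_col (text : String) (position : Int) (out : Option (Int × Int)) : Prop := out = position_to_line_col_alt text position
instance (text : String) (position : Int) (out : Option (Int × Int)) : Decidable (Spec_position_to_line_col text position out) := by unfold Spec_position_to_line_col; infer_instance

-- ===== CLAIM (what is proved, stated in full; the proofs are below) =====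
def Claim_equal_position_to_line_col : Prop := ∀ (text : String) (position : Int), Dom_position_to_line_col text position → Spec_position_to_line_col text position (position_to_line_col text position)

-- ===== LEMMAS AND PROOFS =====

-- a simple structural version of text.split("\n")
def splitNl : List Char → List (List Char)
  | [] => [[]]
  | c :: cs =>
      if c = '\n' then [] :: splitNl cs
      else match splitNl cs with
        | [] => [[c]]
        | h :: t => (c :: h) :: t

lemma splitNl_ne_nil (cs : List Char) : splitNl cs ≠ [] := by
  induction cs with
  | nil => simp [splitNl]
  | cons c cs ih =>
      simp only [splitNl]
      split
      · simp
      · cases h : splitNl cs <;> simp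

lemma splitOn_go_eq (fuel : Nat) (l cur : List Char) (acc : List (List Char))
    (h : l.length < fuel) :
    PySem.Chars.splitOn.go ['\n'] fuel l cur acc
      = acc.reverse ++ (splitNl l).modifyHead (cur.reverse ++ ·) := by
  induction fuel generalizing l cur acc with
  | zero => omega
  | succ n ih =>
      cases l with
      | nil => simp [PySem.Chars.splitOn.go, splitNl]
      | cons c rest =>
          by_cases hc : c = '\n'
          · subst hc
            have : PySem.Chars.splitOn.go ['\n'] (n+1) ('\n' :: rest) cur acc
                = PySem.Chars.splitOn.go ['\n'] n rest [] (cur.reverse :: acc) := by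
              simp [PySem.Chars.splitOn.go, List.isPrefixOf]
            rw [this, ih rest [] (cur.reverse :: acc) (by simpa using h)]
            simp [splitNl]
            cases hx : splitNl rest <;> simp
          · have : PySem.Chars.splitOn.go ['\n'] (n+1) (c :: rest) cur acc
                = PySem.Chars.splitOn.go ['\n'] n rest (c :: cur) acc := by
              simp [PySem.Chars.splitOn.go, List.isPrefixOf, Ne.symm hc]
            rw [this, ih rest (c :: cur) acc (by simpa using h)]
            simp only [splitNl, if_neg hc]
            cases hs : splitNl rest with
            | nil => exact absurd hs (splitNl_ne_nil rest)
            | cons h t => simp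

lemma splitOn_eq_splitNl (cs : List Char) :
    PySem.Chars.splitOn cs ['\n'] = splitNl cs := by
  have h1 : PySem.Chars.splitOn cs ['\n']
      = PySem.Chars.splitOn.go ['\n'] (cs.length + 1) cs [] [] := rfl
  rw [h1, splitOn_go_eq (cs.length + 1) cs [] [] (by omega)]
  cases hx : splitNl cs <;> simp

-- one step of A's loop
lemma pvALoop_cons (pos lineNum cur : Int) (line : List Char) (rest : List (Int × List Char)) :
    pvALoop pos ((lineNum, line) :: rest) cur
      = if cur + ((line.length : Int) + 1) > pos then some (lineNum, pos - cur)
        else pvALoop pos rest (cur + ((line.length : Int) + 1)) := rfl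

-- the main invariant: A's line loop computes B's char fold
lemma aLoop_eq_fold (cs : List Char) (p : Nat) (k cur : Int) (pre : List Char)
    (h : List Char) (t : List (List Char)) (hsp : splitNl cs = h :: t)
    (hp : p ≤ cs.length) :
    pvALoop (cur + pre.length + p) (PySem.List.enumerate ((pre ++ h) :: t) k) cur
      = some ((cs.take p).foldl pvBStep (k, (pre.length : Int))) := by
  induction cs generalizing p k cur pre h t with
  | nil =>
      simp [splitNl] at hsp
      obtain ⟨rfl, rfl⟩ := hsp
      have hp0 : p = 0 := by simpa using hp
      subst hp0
      rw [PySem.List.enumerate_cons, pvALoop_cons,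
        if_pos (by simp only [List.append_nil]; omega)]
      simp only [Nat.cast_zero, List.take_zero, List.foldl_nil, Option.some.injEq,
        Prod.mk.injEq]
      exact ⟨trivial, by omega⟩
  | cons c cs ih =>
      obtain ⟨h', t', hcs⟩ : ∃ h' t', splitNl cs = h' :: t' := by
        cases hx : splitNl cs with
        | nil => exact absurd hx (splitNl_ne_nil cs)
        | cons a b => exact ⟨a, b, rfl⟩
      by_cases hc : c = '\n'
      · subst hc
        rw [show splitNl ('\n' :: cs) = [] :: splitNl cs by simp [splitNl], hcs] at hsp
        obtain ⟨rfl, rfl⟩ : ([] : List Char) = h ∧ h' :: t' = t := by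
          constructor <;> injection hsp
        cases p with
        | zero =>
            rw [PySem.List.enumerate_cons, pvALoop_cons,
              if_pos (by simp only [List.append_nil]; omega)]
            simp only [Nat.cast_zero, List.take_zero, List.foldl_nil, Option.some.injEq,
              Prod.mk.injEq]
            exact ⟨trivial, by omega⟩
        | succ p =>
            rw [PySem.List.enumerate_cons, pvALoop_cons, List.append_nil,
              if_neg (by push_cast; omega)]
            have hih := ih p (k + 1) (cur + ((pre.length : Int) + 1)) [] h' t' hcs
              (by simpa using Nat.succ_le_succ_iff.mp (by simpa using hp))
            simp only [List.length_nil, Nat.cast_zero, add_zero, List.nil_append] at hih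
            rw [show cur + ((pre.length : Int) + 1) + (p : Int)
                = cur + (pre.length : Int) + ((p + 1 : Nat) : Int) by push_cast; ring] at hih
            rw [hih]
            simp [pvBStep]
      · rw [show splitNl (c :: cs) = (c :: h') :: t' by
              simp only [splitNl, if_neg hc, hcs]] at hsp
        obtain ⟨rfl, rfl⟩ : c :: h' = h ∧ t' = t := by
          constructor <;> injection hsp
        cases p with
        | zero =>
            rw [PySem.List.enumerate_cons, pvALoop_cons,
              if_pos (by simp only [List.length_append, List.length_cons]; omega)]
            simp only [Nat.cast_zero, List.take_zero, List.foldl_nil, Option.some.injEq,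
              Prod.mk.injEq]
            exact ⟨trivial, by omega⟩
        | succ p =>
            have hih := ih p k cur (pre ++ [c]) h' t' hcs
              (by simpa using Nat.succ_le_succ_iff.mp (by simpa using hp))
            rw [show (pre ++ [c]) ++ h' = pre ++ c :: h' by simp] at hih
            rw [show cur + (((pre ++ [c]).length : Nat) : Int) + (p : Int)
                = cur + (pre.length : Int) + ((p + 1 : Nat) : Int) by
              simp only [List.length_append, List.length_cons, List.length_nil]
              push_cast; ring] at hih
            rw [hih]
            simp [pvBStep, hc]

-- ===== VERDICT =====
theorem position_to_line_col_spec : Claim_equal_position_to_line_col := by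
  intro text position _
  unfold Spec_position_to_line_col position_to_line_col position_to_line_col_alt
  by_cases hg : position < 0 ∨ position > PySem.Str.len text
  · rw [if_pos hg, if_pos hg]
  · rw [if_neg hg, if_neg hg]
    rw [not_or, not_lt, not_lt] at hg
    obtain ⟨h0, hlen⟩ := hg
    have hlen' : position.toNat ≤ text.toList.length := by
      simp only [PySem.Str.len, String.length_toList] at hlen ⊢
      omega
    obtain ⟨h, t, hsp⟩ : ∃ h t, splitNl text.toList = h :: t := by
      cases hx : splitNl text.toList with
      | nil => exact absurd hx (splitNl_ne_nil _)
      | cons a b => exact ⟨a, b, rfl⟩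
    have hmain := aLoop_eq_fold text.toList position.toNat 0 0 [] h t hsp hlen'
    rw [List.nil_append, ← hsp] at hmain
    simp only [List.length_nil, Nat.cast_zero, zero_add] at hmain
    rw [Int.toNat_of_nonneg h0] at hmain
    simp only [splitOn_eq_splitNl, hmain]
    rw [PySem.Chars.slice_eq_listSlice, PySem.List.slice_to _ h0]
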